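-- pv_equiv track=rewrite | github.com/timointhebush/AlgorithmStudy | programmers/징검다리_건너기.py | is_crossable
-- ===== SOURCE A (Python) =====
-- def is_crossable(stones, k):
--     max_n_empty = 0
--     j = -1
--     for i in range(len(stones)):
--         if i > j and stones[i] <= 0:
--             n_empty = 1
--             j = i + 1
--             while j < len(stones) and stones[j] <= 0:
--                 n_empty += 1
--                 j += 1
--             if n_empty > max_n_empty:
--                 max_n_empty = n_empty
--     return max_n_empty < k
-- ===== SOURCE B (Python) =====
-- def is_crossable(stones, k):
--     # positions of positive stones, with sentinels at -1 and len(stones);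
--     # the longest run of non-positive stones is the largest gap between
--     # consecutive positions, minus one
--     pos = [-1] + [i for i, s in enumerate(stones) if s > 0] + [len(stones)]
--     return max(b - a - 1 for a, b in zip(pos, pos[1:])) < k
-- ===== Notes on version B (the rewrite author's own statement) =====
-- stated objective: alternative
-- what changed: Replaces A's outer-for/inner-while index-skipping scan with a gap computation: collect the indices of positive stones (with sentinels -1 and len(stones)) and take the maximum gap between consecutive indices minus one; return that maximum < k.
import Mathlib
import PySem

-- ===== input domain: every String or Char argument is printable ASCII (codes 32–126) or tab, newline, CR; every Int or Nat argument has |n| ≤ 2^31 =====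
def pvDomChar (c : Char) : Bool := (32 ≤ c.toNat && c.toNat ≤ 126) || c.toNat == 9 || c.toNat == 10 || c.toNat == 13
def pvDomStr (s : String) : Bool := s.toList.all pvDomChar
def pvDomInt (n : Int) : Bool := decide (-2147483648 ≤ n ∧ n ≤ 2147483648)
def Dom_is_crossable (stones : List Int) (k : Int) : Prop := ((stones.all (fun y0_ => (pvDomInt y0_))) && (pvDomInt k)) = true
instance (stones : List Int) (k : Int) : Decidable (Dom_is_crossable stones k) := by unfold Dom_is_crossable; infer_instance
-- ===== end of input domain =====

-- B replaces A's outer-for/inner-while index-skipping scan by a different algorithm of the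
-- same cost: the indices of positive stones (with sentinels -1 and len(stones)) are collected
-- and the answer is (maximum gap between consecutive indices) - 1 < k.

-- ===== PORT A =====
-- inner 'while j < len(stones) and stones[j] <= 0: n_empty += 1; j += 1'; returns (n_empty, j).
-- stones[j] is read only under j < len(stones), so List.getD is exact here.
def pvWhileA (stones : List Int) (j : Nat) (n : Nat) : Nat × Nat :=
  if h : j < stones.length ∧ stones.getD j 0 ≤ 0 then
    pvWhileA stones (j + 1) (n + 1)
  else (n, j)
termination_by stones.length - j
decreasing_by omega

-- 'for i in range(len(stones))' with state (max_n_empty, j); stones[i] read only under i < len(stones)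
def pvForA (stones : List Int) (i : Nat) (maxv : Nat) (j : Int) : Nat :=
  if i < stones.length then
    if j < (i : Int) ∧ stones.getD i 0 ≤ 0 then
      let p := pvWhileA stones (i + 1) 1
      pvForA stones (i + 1) (if maxv < p.1 then p.1 else maxv) (p.2 : Int)
    else pvForA stones (i + 1) maxv j
  else maxv
termination_by stones.length - i
decreasing_by all_goals omega

def is_crossable (stones : List Int) (k : Int) : Bool :=
  decide ((pvForA stones 0 0 (-1) : Int) < k)

-- ===== PORT B =====
-- pos = [-1] + [i for i, s in enumerate(stones) if s > 0] + [len(stones)]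
-- return max(b - a - 1 for a, b in zip(pos, pos[1:])) < k
def is_crossable_alt (stones : List Int) (k : Int) : Bool :=
  let pos : List Int :=
    ([(-1 : Int)] ++ (PySem.List.enumerate stones).filterMap
        (fun p => if p.2 > 0 then some p.1 else none)) ++ [(stones.length : Int)]
  match PySem.List.max? ((pos.zip (pos.drop 1)).map (fun q => q.2 - q.1 - 1)) (fun y => y) with
  | some m => decide (m < k)
  | none => false  -- unreachable: pos always has at least two elements

-- ===== PRECONDITION & SPEC =====
def Spec_is_crossable (stones : List Int) (k : Int) (out : Bool) : Prop := out = is_crossable_alt stones k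
instance (stones : List Int) (k : Int) (out : Bool) : Decidable (Spec_is_crossable stones k out) := by unfold Spec_is_crossable; infer_instance

-- ===== CLAIM (what is proved, stated in full; the proofs are below) =====
def Claim_equal_is_crossable : Prop := ∀ (stones : List Int) (k : Int), Dom_is_crossable stones k → Spec_is_crossable stones k (is_crossable stones k)

-- ===== LEMMAS AND PROOFS =====

-- length of the leading run of non-positive stones
def pvCnt : List Int → Nat
  | [] => 0
  | s :: t => if s ≤ 0 then pvCnt t + 1 else 0

-- maximum length of a run of consecutive non-positive stones
def pvMrun : List Int → Nat
  | [] => 0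
  | s :: t => if s ≤ 0 then max (pvCnt t + 1) (pvMrun (t.drop (pvCnt t))) else pvMrun t
termination_by l => l.length
decreasing_by all_goals (simp only [List.length_drop, List.length_cons]; omega)

-- indices (starting at o) of the positive elements
def pvIdx (o : Int) : List Int → List Int
  | [] => []
  | s :: t => if 0 < s then o :: pvIdx (o + 1) t else pvIdx (o + 1) t

-- maximum of (x - previous - 1) over the chain a, xs…, e
def pvMaxGap (a : Int) : List Int → Int → Int
  | [], e => e - a - 1
  | x :: xs, e => max (x - a - 1) (pvMaxGap x xs e)

lemma pvCnt_drop_pos (stones : List Int) (i : Nat) (hi : i < stones.length)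
    (hs : 0 < stones.getD i 0) : pvCnt (stones.drop i) = 0 := by
  rw [List.drop_eq_getElem_cons hi, pvCnt]
  rw [List.getD_eq_getElem _ _ hi] at hs
  simp [show ¬ stones[i] ≤ 0 by omega]

lemma pvCnt_drop_nonpos (stones : List Int) (i : Nat) (hi : i < stones.length)
    (hs : stones.getD i 0 ≤ 0) : pvCnt (stones.drop i) = pvCnt (stones.drop (i + 1)) + 1 := by
  rw [List.drop_eq_getElem_cons hi, pvCnt]
  rw [List.getD_eq_getElem _ _ hi] at hs
  simp [hs]

lemma pvMrun_drop_pos (stones : List Int) (i : Nat) (hi : i < stones.length)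
    (hs : 0 < stones.getD i 0) : pvMrun (stones.drop i) = pvMrun (stones.drop (i + 1)) := by
  rw [List.drop_eq_getElem_cons hi, pvMrun]
  rw [List.getD_eq_getElem _ _ hi] at hs
  simp [show ¬ stones[i] ≤ 0 by omega]

lemma pvMrun_drop_nonpos (stones : List Int) (i : Nat) (hi : i < stones.length)
    (hs : stones.getD i 0 ≤ 0) :
    pvMrun (stones.drop i)
      = max (pvCnt (stones.drop (i + 1)) + 1)
          (pvMrun ((stones.drop (i + 1)).drop (pvCnt (stones.drop (i + 1))))) := by
  rw [List.drop_eq_getElem_cons hi, pvMrun]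
  rw [List.getD_eq_getElem _ _ hi] at hs
  simp [hs]

-- the leading run either is everything or stops at a positive stone (R)
lemma pvMrun_eq_max (l : List Int) : pvMrun l = max (pvCnt l) (pvMrun (l.drop (pvCnt l))) := by
  cases l with
  | nil => simp [pvMrun, pvCnt]
  | cons s t =>
    by_cases h : s ≤ 0
    · simp [pvMrun, pvCnt, h, List.drop_succ_cons]
    · simp [pvMrun, pvCnt, h]

-- the inner while loop counts the run starting at j and leaves j just past it (W)
lemma pvWhileA_eq (stones : List Int) : ∀ (j n : Nat),
    pvWhileA stones j n = (n + pvCnt (stones.drop j), j + pvCnt (stones.drop j)) := by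
  intro j n
  fun_induction pvWhileA stones j n with
  | case1 j n h ih =>
    rw [pvCnt_drop_nonpos stones j h.1 h.2, ih]
    simp only [Prod.mk.injEq]
    omega
  | case2 j n h =>
    rcases Nat.lt_or_ge j stones.length with hj | hj
    · have hs : 0 < stones.getD j 0 := by
        by_contra hc
        exact h ⟨hj, by omega⟩
      rw [pvCnt_drop_pos stones j hj hs]
      simp
    · rw [List.drop_eq_nil_of_le hj]
      simp [pvCnt]

-- A's main loop invariant: j is either behind i, or sits exactly at the end of the run
-- through i already counted into maxv (A1)
lemma pvForA_eq (stones : List Int) : ∀ (d i maxv : Nat) (j : Int),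
    stones.length - i ≤ d →
    ((i : Int) ≤ j → j = (i : Int) + pvCnt (stones.drop i) ∧ pvCnt (stones.drop i) ≤ maxv) →
    pvForA stones i maxv j = max maxv (pvMrun (stones.drop i)) := by
  intro d
  induction d with
  | zero =>
    intro i maxv j hd _
    rw [pvForA.eq_def]
    have hi : ¬ i < stones.length := by omega
    rw [List.drop_eq_nil_of_le (by omega)]
    simp [hi, pvMrun]
  | succ d ih =>
    intro i maxv j hd H
    rw [pvForA.eq_def]
    by_cases hi : i < stones.length
    · rw [if_pos hi]
      by_cases hc : j < (i : Int) ∧ stones.getD i 0 ≤ 0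
      · rw [if_pos hc, pvWhileA_eq]
        dsimp only
        set c := pvCnt (stones.drop (i + 1)) with hc1
        have hrun := pvMrun_drop_nonpos stones i hi hc.2
        have hcnt := pvCnt_drop_nonpos stones i hi hc.2
        rw [ih (i + 1) (if maxv < 1 + c then 1 + c else maxv) ((i + 1 + c : Nat) : Int)
              (by omega)
              (by intro _
                  constructor
                  · push_cast; ring
                  · split_ifs <;> omega)]
        rw [pvMrun_eq_max (stones.drop (i + 1)), hrun]
        split_ifs <;> omega
      · rw [if_neg hc]
        rcases Int.lt_or_le j (i : Int) with hj | hj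
        · -- j behind i, so stones[i] must be positive
          have hs : 0 < stones.getD i 0 := by
            by_contra hcontra
            exact hc ⟨hj, by omega⟩
          rw [ih (i + 1) maxv j (by omega) (by intro hle; omega)]
          rw [pvMrun_drop_pos stones i hi hs]
        · obtain ⟨hjeq, hle⟩ := H hj
          by_cases hs : stones.getD i 0 ≤ 0
          · have hcnt := pvCnt_drop_nonpos stones i hi hs
            have hrun := pvMrun_drop_nonpos stones i hi hs
            rw [ih (i + 1) maxv j (by omega)
                  (by intro _; constructor
                      · rw [hjeq]; push_cast; omega
                      · omega)]
            have hR := pvMrun_eq_max (stones.drop (i + 1))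
            rw [hR]
            omega
          · have hs' : 0 < stones.getD i 0 := by omega
            have hcnt := pvCnt_drop_pos stones i hi hs'
            rw [ih (i + 1) maxv j (by omega) (by intro hle2; omega)]
            rw [pvMrun_drop_pos stones i hi hs']
    · rw [if_neg hi]
      rw [List.drop_eq_nil_of_le (by omega)]
      simp [pvMrun]

-- folding max over the gap list is pvMaxGap
lemma pvFold_gaps : ∀ (xs : List Int) (a e v : Int),
    ((((a :: (xs ++ [e])).zip (xs ++ [e])).map (fun q => q.2 - q.1 - 1)).foldl max v)
      = max v (pvMaxGap a xs e) := by
  intro xs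
  induction xs with
  | nil => intro a e v; simp [pvMaxGap]
  | cons x xs ih =>
    intro a e v
    simp only [List.cons_append, List.zip_cons_cons, List.map_cons, List.foldl_cons]
    rw [ih x e (max v (x - a - 1))]
    rw [pvMaxGap]
    rw [max_assoc]

-- python's max over the nonempty gap generator
lemma pvMaxQ (xs : List Int) (a e : Int) :
    PySem.List.max? (((a :: (xs ++ [e])).zip ((a :: (xs ++ [e])).drop 1)).map
        (fun q => q.2 - q.1 - 1)) (fun y => y)
      = some (pvMaxGap a xs e) := by
  cases xs with
  | nil =>
    simp [PySem.List.max?_id_cons, pvMaxGap]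
  | cons x xs =>
    simp only [List.drop_one, List.tail_cons, List.cons_append, List.zip_cons_cons,
      List.map_cons, PySem.List.max?_id_cons]
    rw [pvFold_gaps xs x e (x - a - 1)]
    rw [pvMaxGap]

-- the filtered enumerate is pvIdx
lemma pvIdx_eq : ∀ (l : List Int) (s : Int),
    (PySem.List.enumerate l s).filterMap (fun p => if p.2 > 0 then some p.1 else none)
      = pvIdx s l := by
  intro l
  induction l with
  | nil => intro s; simp [PySem.List.enumerate_nil, pvIdx]
  | cons x t ih =>
    intro s
    rw [PySem.List.enumerate_cons]
    by_cases hx : 0 < x <;> simp [hx, pvIdx, ih]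

-- the max gap over the sentinelled positive positions is the max non-positive run (C)
lemma pvMaxGap_eq : ∀ (l : List Int) (o a : Int), a < o →
    pvMaxGap a (pvIdx o l) (o + l.length)
      = max (o - a - 1 + (pvCnt l : Int)) ((pvMrun (l.drop (pvCnt l)) : Int)) := by
  intro l
  induction l with
  | nil =>
    intro o a ha
    simp only [pvIdx, pvMaxGap, pvCnt, pvMrun, List.length_nil, List.drop_nil]
    push_cast
    omega
  | cons s t ih =>
    intro o a ha
    by_cases hs : 0 < s
    · have h1 : pvIdx o (s :: t) = o :: pvIdx (o + 1) t := by simp [pvIdx, hs]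
      have h2 : pvCnt (s :: t) = 0 := by simp [pvCnt]; omega
      have h3 : pvMrun (s :: t) = pvMrun t := by rw [pvMrun]; simp [show ¬ s ≤ 0 by omega]
      rw [h1, pvMaxGap]
      have he : o + (s :: t).length = (o + 1) + (t.length : Int) := by
        simp [List.length_cons]; ring
      rw [he, ih (o + 1) o (by omega)]
      rw [h2]
      simp only [List.drop_zero, Nat.cast_zero]
      rw [h3]
      have hrt := pvMrun_eq_max t
      omega
    · have h1 : pvIdx o (s :: t) = pvIdx (o + 1) t := by simp [pvIdx, hs]
      have h2 : pvCnt (s :: t) = pvCnt t + 1 := by simp [pvCnt]; omega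
      have h3 : (s :: t).drop (pvCnt t + 1) = t.drop (pvCnt t) := List.drop_succ_cons
      rw [h1]
      have he : o + (s :: t).length = (o + 1) + (t.length : Int) := by
        simp [List.length_cons]; ring
      rw [he, ih (o + 1) a (by omega)]
      rw [h2, h3]
      push_cast
      omega

-- B computes pvMrun
lemma pvAlt_eq (stones : List Int) (k : Int) :
    is_crossable_alt stones k = decide ((pvMrun stones : Int) < k) := by
  unfold is_crossable_alt
  have hpos : ([(-1 : Int)] ++ (PySem.List.enumerate stones).filterMap
        (fun p => if p.2 > 0 then some p.1 else none)) ++ [(stones.length : Int)]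
      = (-1 : Int) :: (pvIdx 0 stones ++ [(stones.length : Int)]) := by
    rw [pvIdx_eq]
    simp
  have hg : pvMaxGap (-1) (pvIdx 0 stones) (stones.length : Int)
      = max ((pvCnt stones : Int)) ((pvMrun (stones.drop (pvCnt stones)) : Int)) := by
    have := pvMaxGap_eq stones 0 (-1) (by omega)
    simpa using this
  have hr := pvMrun_eq_max stones
  have hmax : max ((pvCnt stones : Int)) ((pvMrun (stones.drop (pvCnt stones)) : Int))
      = ((pvMrun stones : Int)) := by omega
  simp only [hpos, pvMaxQ (pvIdx 0 stones) (-1) (stones.length : Int), hg, hmax]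

-- A computes pvMrun
lemma pvA_eq (stones : List Int) (k : Int) :
    is_crossable stones k = decide ((pvMrun stones : Int) < k) := by
  unfold is_crossable
  rw [pvForA_eq stones stones.length 0 0 (-1) (by omega) (by intro h; omega)]
  simp

-- ===== VERDICT (by name: the statement is the Claim_ definition above) =====
theorem is_crossable_spec : Claim_equal_is_crossable := by
  intro stones k _
  unfold Spec_is_crossable
  rw [pvA_eq, pvAlt_eq]
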